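-- pv_equiv track=rewrite | github.com/jeannefukumaru/mlflow_traces_sql_agent | nba_sql_agent/sql_agent_nb.py | parse_player_names
-- ===== SOURCE A (Python) =====
-- def parse_player_names(query):
--     known_nicknames = ["iceman", "air jordan"]
--     nicknames_in_query = [n for n in known_nicknames if n in query]
--     player_nickname_map = {"iceman": "George Gervin", "air jordan": "Michael Jordan"}
--
--     for n in nicknames_in_query:
--         try:
--             real_name = player_nickname_map[n]
--             query = query.replace(n, real_name)
--         except KeyError:
--             pass
--
--     return query
-- ===== SOURCE B (Python) =====
-- def parse_player_names(query):
--     # One left-to-right scan replacing either nickname at each position,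
--     # instead of one full replace pass per nickname.
--     out = []
--     i = 0
--     n = len(query)
--     while i < n:
--         if query.startswith("iceman", i):
--             out.append("George Gervin")
--             i += 6
--         elif query.startswith("air jordan", i):
--             out.append("Michael Jordan")
--             i += 10
--         else:
--             out.append(query[i])
--             i += 1
--     return "".join(out)
-- ===== Notes on version B (the rewrite author's own statement) =====
-- stated objective: alternative
-- what changed: Replaces one full-string str.replace pass per nickname (with a containment pre-filter and a dict lookup) by a single left-to-right scan that replaces whichever nickname matches at the current position.
import Mathlib
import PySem

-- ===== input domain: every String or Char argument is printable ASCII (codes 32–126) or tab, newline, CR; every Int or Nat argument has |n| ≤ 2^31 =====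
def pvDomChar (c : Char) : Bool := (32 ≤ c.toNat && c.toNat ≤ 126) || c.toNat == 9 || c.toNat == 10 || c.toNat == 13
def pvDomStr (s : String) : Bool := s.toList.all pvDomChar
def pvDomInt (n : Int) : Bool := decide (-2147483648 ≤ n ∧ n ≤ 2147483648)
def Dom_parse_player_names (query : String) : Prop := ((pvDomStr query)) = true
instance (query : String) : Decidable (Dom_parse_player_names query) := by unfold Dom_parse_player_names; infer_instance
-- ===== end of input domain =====

-- B replaces A's per-nickname full-string replace passes by a single left-to-right scan
-- that substitutes whichever nickname matches at the current position (alternative decomposition).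

-- ===== PORT A =====
def parse_player_names (query : String) : String :=
  let known_nicknames : List String := ["iceman", "air jordan"]
  let nicknames_in_query : List String := known_nicknames.filter (fun n => PySem.Str.isIn n query)
  let player_nickname_map : PySem.Dict String String :=
    PySem.Dict.ofList [("iceman", "George Gervin"), ("air jordan", "Michael Jordan")]
  nicknames_in_query.foldl (fun q n =>
    match player_nickname_map.get? n with
    | some real_name => PySem.Str.replace q n real_name
    | none => q) query    -- except KeyError: pass

-- ===== PORT B =====
-- the while loop of Source B: at each position replace "iceman" / "air jordan" or keep the char
def pvScanGo (l : List Char) : List Char :=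
  match l with
  | [] => []
  | c :: t =>
    if PySem.Chars.startswith (c :: t) "iceman".toList then
      "George Gervin".toList ++ pvScanGo ((c :: t).drop 6)
    else if PySem.Chars.startswith (c :: t) "air jordan".toList then
      "Michael Jordan".toList ++ pvScanGo ((c :: t).drop 10)
    else
      c :: pvScanGo t
termination_by l.length
decreasing_by all_goals (simp; try omega)

def parse_player_names_alt (query : String) : String :=
  String.ofList (pvScanGo query.toList)

-- ===== PRECONDITION & SPEC =====
def Spec_parse_player_names (query : String) (out : String) : Prop := out = parse_player_names_alt query
instance (query : String) (out : String) : Decidable (Spec_parse_player_names query out) := by unfold Spec_parse_player_names; infer_instance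

-- ===== CLAIM (what is proved, stated in full; the proofs are below) =====
def Claim_equal_parse_player_names : Prop := ∀ (query : String), Dom_parse_player_names query → Spec_parse_player_names query (parse_player_names query)

-- ===== LEMMAS AND PROOFS =====

-- A clean structural view of PySem.Chars.replace (for a nonempty pattern)
def pvRep (old new : List Char) (l : List Char) : List Char :=
  match l with
  | [] => []
  | c :: t =>
    if h : old.isPrefixOf (c :: t) = true ∧ old ≠ [] then
      new ++ pvRep old new ((c :: t).drop old.length)
    else
      c :: pvRep old new t
termination_by l.length
decreasing_by
  all_goals simp
  have : 0 < old.length := List.length_pos_iff.mpr h.2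
  omega

theorem pv_go_eq_rep (old new : List Char) (hold : old ≠ []) :
    ∀ (fuel : Nat) (l acc : List Char), l.length ≤ fuel →
      PySem.Chars.replace.go old new fuel l acc = acc.reverse ++ pvRep old new l := by
  intro fuel
  induction fuel with
  | zero =>
    intro l acc hl
    have : l = [] := List.length_eq_zero_iff.mp (Nat.le_zero.mp hl)
    subst this
    simp [PySem.Chars.replace.go, pvRep]
  | succ n ih =>
    intro l acc hl
    match l with
    | [] => simp [PySem.Chars.replace.go, pvRep]
    | c :: t =>
      rw [PySem.Chars.replace.go, pvRep]
      by_cases hp : old.isPrefixOf (c :: t) = true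
      · rw [if_pos hp, dif_pos (show old.isPrefixOf (c :: t) = true ∧ old ≠ [] from ⟨hp, hold⟩)]
        rw [ih (List.drop old.length (c :: t)) (new.reverse ++ acc) (by
          have : 0 < old.length := List.length_pos_iff.mpr hold
          simp at hl ⊢
          omega)]
        simp
      · rw [if_neg hp, dif_neg (fun hand => hp hand.1)]
        rw [ih t (c :: acc) (by simp at hl ⊢; omega)]
        simp

theorem pv_replace_eq_rep (old new l : List Char) (hold : old ≠ []) :
    PySem.Chars.replace l old new = pvRep old new l := by
  rw [PySem.Chars.replace, if_neg (by simp [hold]), pv_go_eq_rep old new hold l.length l [] le_rfl]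
  simp

-- a prefix of an append is decided inside the first part or swallows it
theorem pv_prefix_append_cases {old s X : List Char} (h : old <+: s ++ X) :
    old <+: s ∨ s <+: old := by
  rcases Nat.le_total old.length s.length with hle | hle
  · exact Or.inl (List.prefix_of_prefix_length_le h (List.prefix_append s X) hle)
  · exact Or.inr (List.prefix_of_prefix_length_le (List.prefix_append s X) h hle)

-- if no occurrence of `old` can start inside `g`, replacement walks over `g` unchanged
theorem pv_rep_append (old new g : List Char)
    (hg : ∀ j, j < g.length → ¬ old <+: g.drop j ∧ ¬ g.drop j <+: old) :
    ∀ X, pvRep old new (g ++ X) = g ++ pvRep old new X := by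
  induction g with
  | nil => intro X; simp
  | cons c g' ih =>
    intro X
    have h0 := hg 0 (by simp)
    simp only [List.drop_zero] at h0
    have hnp : ¬ old.isPrefixOf (c :: g' ++ X) = true := by
      rw [List.isPrefixOf_iff_prefix]
      intro hpre
      rcases pv_prefix_append_cases hpre with hc | hc
      · exact h0.1 hc
      · exact h0.2 hc
    rw [List.cons_append, pvRep, dif_neg (fun hand => hnp hand.1)]
    rw [ih (fun j hj => by simpa using hg (j + 1) (by simpa using hj))]
    simp

-- a 'G'-free prefix of the iceman-replaced string was already a prefix before replacing
theorem pv_rep_pres (t p : List Char) (hG : 'G' ∉ p)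
    (h : p <+: pvRep "iceman".toList "George Gervin".toList t) : p <+: t := by
  match t with
  | [] =>
    rw [pvRep] at h
    exact h
  | c :: t' =>
    by_cases hp : ("iceman".toList).isPrefixOf (c :: t') = true
    · rw [pvRep, dif_pos ⟨hp, by decide⟩] at h
      match p with
      | [] => exact List.nil_prefix
      | d :: p' =>
        have hsh : ("George Gervin".toList) ++
            pvRep "iceman".toList "George Gervin".toList ((c :: t').drop ("iceman".toList).length) =
            'G' :: ("eorge Gervin".toList ++
              pvRep "iceman".toList "George Gervin".toList ((c :: t').drop ("iceman".toList).length)) := rfl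
        rw [hsh, List.cons_prefix_cons] at h
        exact absurd (h.1 ▸ List.mem_cons_self) hG
    · rw [pvRep, dif_neg (fun hand => hp hand.1)] at h
      match p with
      | [] => exact List.nil_prefix
      | d :: p' =>
        rw [List.cons_prefix_cons] at h ⊢
        exact ⟨h.1, pv_rep_pres t' p' (fun hm => hG (List.mem_cons_of_mem _ hm)) h.2⟩
termination_by t.length
decreasing_by simp

-- "air jordan" occurs in the iceman-replaced string only where it occurred before
theorem pv_rep_occ (t : List Char)
    (h : ∃ j, "air jordan".toList <+: (pvRep "iceman".toList "George Gervin".toList t).drop j) :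
    ∃ j, "air jordan".toList <+: t.drop j := by
  match t with
  | [] =>
    rw [pvRep] at h
    simpa using h
  | c :: t' =>
    by_cases hp : ("iceman".toList).isPrefixOf (c :: t') = true
    · rw [pvRep, dif_pos ⟨hp, by decide⟩] at h
      obtain ⟨j, hj⟩ := h
      by_cases hlt : j < ("George Gervin".toList).length
      · exfalso
        rw [List.drop_append_of_le_length (by omega)] at hj
        rcases pv_prefix_append_cases hj with hc | hc
        · revert hc
          exact (by decide : ∀ k, k < ("George Gervin".toList).length →
              ¬ "air jordan".toList <+: ("George Gervin".toList).drop k) j hlt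
        · revert hc
          exact (by decide : ∀ k, k < ("George Gervin".toList).length →
              ¬ ("George Gervin".toList).drop k <+: "air jordan".toList) j hlt
      · rw [List.drop_append] at hj
        have h13 : ("George Gervin".toList).length = 13 := rfl
        have hnil : List.drop j "George Gervin".toList = [] :=
          List.drop_eq_nil_of_le (by omega)
        rw [hnil, List.nil_append, h13] at hj
        obtain ⟨j', hj'⟩ := pv_rep_occ ((c :: t').drop ("iceman".toList).length) ⟨j - 13, hj⟩
        rw [show ("iceman".toList).length = 6 from rfl] at hj'
        refine ⟨6 + j', ?_⟩
        rw [← List.drop_drop]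
        exact hj'
    · rw [pvRep, dif_neg (fun hand => hp hand.1)] at h
      obtain ⟨j, hj⟩ := h
      match j with
      | 0 =>
        refine ⟨0, ?_⟩
        simp only [List.drop_zero] at hj ⊢
        have heq : c :: pvRep "iceman".toList "George Gervin".toList t' =
            pvRep "iceman".toList "George Gervin".toList (c :: t') := by
          rw [pvRep, dif_neg (fun hand => hp hand.1)]
        rw [heq] at hj
        exact pv_rep_pres (c :: t') _ (by decide) hj
      | j' + 1 =>
        obtain ⟨k, hk⟩ := pv_rep_occ t' ⟨j', by simpa using hj⟩
        exact ⟨k + 1, by simpa using hk⟩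
termination_by t.length
decreasing_by all_goals (simp; try omega)

-- replacement with no occurrence is the identity
theorem pv_rep_id (old new : List Char) :
    ∀ l, (∀ j, ¬ old <+: l.drop j) → pvRep old new l = l := by
  intro l
  induction l with
  | nil => intro _; rw [pvRep]
  | cons c t ih =>
    intro h
    have h0 : ¬ old.isPrefixOf (c :: t) = true := by
      rw [List.isPrefixOf_iff_prefix]
      simpa using h 0
    rw [pvRep, dif_neg (fun hand => h0 hand.1), ih (fun j => by simpa using h (j + 1))]

theorem pv_no_occ (sub q : String) (h : PySem.Str.isIn sub q = false) :
    ∀ j, ¬ sub.toList <+: q.toList.drop j := by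
  intro j hj
  have hin : PySem.Chars.isIn sub.toList q.toList = true :=
    (PySem.Chars.exists_prefix_drop_iff_isIn _ _).mp ⟨j, hj⟩
  rw [show PySem.Chars.isIn sub.toList q.toList = PySem.Str.isIn sub q from rfl, h] at hin
  cases hin

-- MAIN: replacing "iceman" everywhere then "air jordan" everywhere = the single scan
theorem pv_main (l : List Char) :
    pvRep "air jordan".toList "Michael Jordan".toList
      (pvRep "iceman".toList "George Gervin".toList l) = pvScanGo l := by
  match l with
  | [] => rw [pvRep, pvRep, pvScanGo]
  | c :: t =>
    by_cases hice : ("iceman".toList).isPrefixOf (c :: t) = true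
    · obtain ⟨t₀, ht₀⟩ := List.isPrefixOf_iff_prefix.mp hice
      have hdrop : (c :: t).drop 6 = t₀ := by
        rw [← ht₀]
        exact List.drop_left' rfl
      have hlen : t₀.length < (c :: t).length := by
        rw [← hdrop]
        simp only [List.length_drop, List.length_cons]
        omega
      rw [pvScanGo]
      simp only [PySem.Chars.startswith]
      rw [if_pos hice, hdrop]
      rw [pvRep, dif_pos ⟨hice, by decide⟩,
        show ("iceman".toList).length = 6 from rfl, hdrop]
      rw [pv_rep_append _ _ _ (by decide), pv_main t₀]
    · by_cases hair : ("air jordan".toList).isPrefixOf (c :: t) = true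
      · obtain ⟨t₀, ht₀⟩ := List.isPrefixOf_iff_prefix.mp hair
        have hdrop : (c :: t).drop 10 = t₀ := by
          rw [← ht₀]
          exact List.drop_left' rfl
        have hlen : t₀.length < (c :: t).length := by
          rw [← hdrop]
          simp only [List.length_drop, List.length_cons]
          omega
        rw [pvScanGo]
        simp only [PySem.Chars.startswith]
        rw [if_neg hice, if_pos hair, hdrop]
        rw [← ht₀, pv_rep_append _ _ _ (by decide)]
        have hcons : "air jordan".toList ++ pvRep "iceman".toList "George Gervin".toList t₀ =
            'a' :: ("ir jordan".toList ++ pvRep "iceman".toList "George Gervin".toList t₀) := rfl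
        rw [hcons, pvRep,
          dif_pos ⟨by rw [← hcons]; exact List.isPrefixOf_iff_prefix.mpr (List.prefix_append _ _),
            by decide⟩]
        rw [show ("air jordan".toList).length = 10 from rfl]
        rw [show List.drop 10 ('a' :: ("ir jordan".toList ++
              pvRep "iceman".toList "George Gervin".toList t₀)) =
            pvRep "iceman".toList "George Gervin".toList t₀ from List.drop_left' rfl]
        rw [pv_main t₀]
      · have hstep : pvRep "iceman".toList "George Gervin".toList (c :: t) =
            c :: pvRep "iceman".toList "George Gervin".toList t := by
          rw [pvRep, dif_neg (fun hand => hice hand.1)]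
        have hnair : ¬ ("air jordan".toList).isPrefixOf
            (c :: pvRep "iceman".toList "George Gervin".toList t) = true := by
          rw [List.isPrefixOf_iff_prefix]
          intro hpre
          rw [← hstep] at hpre
          exact hair (List.isPrefixOf_iff_prefix.mpr (pv_rep_pres (c :: t) _ (by decide) hpre))
        rw [pvScanGo]
        simp only [PySem.Chars.startswith]
        rw [if_neg hice, if_neg hair, hstep, pvRep, dif_neg (fun hand => hnair hand.1), pv_main t]
termination_by l.length
decreasing_by
  · omega
  · omega
  · simp

-- ===== VERDICT (by name: the statement is the Claim_ definition above) =====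
theorem parse_player_names_spec : Claim_equal_parse_player_names := by
  intro q _
  unfold Spec_parse_player_names parse_player_names parse_player_names_alt
  have hg1 : PySem.Dict.get? (PySem.Dict.ofList
      [("iceman", "George Gervin"), ("air jordan", "Michael Jordan")]) "iceman" =
      some "George Gervin" := rfl
  have hg2 : PySem.Dict.get? (PySem.Dict.ofList
      [("iceman", "George Gervin"), ("air jordan", "Michael Jordan")]) "air jordan" =
      some "Michael Jordan" := rfl
  have hrepl : ∀ s o n : String, PySem.Str.replace s o n =
      String.ofList (PySem.Chars.replace s.toList o.toList n.toList) := fun _ _ _ => rfl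
  cases h1 : PySem.Str.isIn "iceman" q <;> cases h2 : PySem.Str.isIn "air jordan" q <;>
    simp only [List.filter, h1, h2, List.foldl, hg1, hg2]
  · -- neither nickname occurs
    rw [← pv_main q.toList,
      pv_rep_id _ _ q.toList (pv_no_occ _ _ h1),
      pv_rep_id _ _ q.toList (pv_no_occ _ _ h2)]
    exact String.ofList_toList.symm
  · -- only "air jordan" occurs
    rw [hrepl,
      pv_replace_eq_rep ("air jordan".toList) ("Michael Jordan".toList) q.toList (by decide),
      ← pv_main q.toList, pv_rep_id _ _ q.toList (pv_no_occ _ _ h1)]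
  · -- only "iceman" occurs
    rw [hrepl,
      pv_replace_eq_rep ("iceman".toList) ("George Gervin".toList) q.toList (by decide),
      ← pv_main q.toList]
    have hno : ∀ j, ¬ "air jordan".toList <+:
        (pvRep "iceman".toList "George Gervin".toList q.toList).drop j := by
      intro j hj
      obtain ⟨k, hk⟩ := pv_rep_occ q.toList ⟨j, hj⟩
      exact pv_no_occ _ _ h2 k hk
    rw [pv_rep_id _ _ _ hno]
  · -- both occur
    rw [hrepl, hrepl, String.toList_ofList,
      pv_replace_eq_rep ("iceman".toList) ("George Gervin".toList) q.toList (by decide),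
      pv_replace_eq_rep ("air jordan".toList) ("Michael Jordan".toList) _ (by decide),
      pv_main]
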